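-- pv_equiv track=rewrite | github.com/pdet/ducklake-polars | src/ducklake_polars/_schema.py | _parse_single_field
-- ===== SOURCE A (Python) =====
-- def _parse_single_field(field_str: str) -> tuple[str, str]:
--     """Parse a single struct field like 'name TYPE' or '"quoted name" TYPE'."""
--     field_str = field_str.strip()
--
--     if field_str.startswith('"'):
--         # Quoted field name - handle escaped double-quotes (SQL standard: "" -> ")
--         i = 1
--         name_parts: list[str] = []
--         while i < len(field_str):
--             if field_str[i] == '"':
--                 if i + 1 < len(field_str) and field_str[i + 1] == '"':
--                     name_parts.append('"')
--                     i += 2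
--                 else:
--                     break
--             else:
--                 name_parts.append(field_str[i])
--                 i += 1
--         name = "".join(name_parts)
--         type_str = field_str[i + 1 :].strip()
--     else:
--         # Unquoted: first token is name, rest is type
--         parts = field_str.split(None, 1)
--         if len(parts) != 2:
--             msg = f"Cannot parse struct field: {field_str}"
--             raise ValueError(msg)
--         name = parts[0]
--         type_str = parts[1]
--
--     return name, type_str
-- ===== SOURCE B (Python) =====
-- def _parse_single_field(field_str: str) -> tuple[str, str]:
--     """Parse a single struct field like 'name TYPE' or '"quoted name" TYPE'."""
--     field_str = field_str.strip()
--
--     if field_str.startswith('"'):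
--         # Quoted name: jump between quote positions with find instead of a
--         # per-character scan; doubled quotes ("") collapse to a single quote.
--         i = 1
--         n = len(field_str)
--         name_parts: list[str] = []
--         while True:
--             j = field_str.find('"', i)
--             if j == -1:
--                 name_parts.append(field_str[i:])
--                 i = n
--                 break
--             if j + 1 < n and field_str[j + 1] == '"':
--                 name_parts.append(field_str[i:j + 1])
--                 i = j + 2
--             else:
--                 name_parts.append(field_str[i:j])
--                 i = j
--                 break
--         name = "".join(name_parts)
--         type_str = field_str[i + 1:].strip()
--     else:
--         parts = field_str.split(None, 1)
--         if len(parts) != 2: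
--             raise ValueError(f"Cannot parse struct field: {field_str}")
--         name, type_str = parts
--
--     return name, type_str
-- ===== Notes on version B (the rewrite author's own statement) =====
-- stated objective: simpler
-- what changed: The quoted-name branch's per-character while loop is replaced by a find-based scan that jumps between quote positions and appends whole chunks (field_str[i:j]) at once; the unquoted branch is unchanged.
import Mathlib
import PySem

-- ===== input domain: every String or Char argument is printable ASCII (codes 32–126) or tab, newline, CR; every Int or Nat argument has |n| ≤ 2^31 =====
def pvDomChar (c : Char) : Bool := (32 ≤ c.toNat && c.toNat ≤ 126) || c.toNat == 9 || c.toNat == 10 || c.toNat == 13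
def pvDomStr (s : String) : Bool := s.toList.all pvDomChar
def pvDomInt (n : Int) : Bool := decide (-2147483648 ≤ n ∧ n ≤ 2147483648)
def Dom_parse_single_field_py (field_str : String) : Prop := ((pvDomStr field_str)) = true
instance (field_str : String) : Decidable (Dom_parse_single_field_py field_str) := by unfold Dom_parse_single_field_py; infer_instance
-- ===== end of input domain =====

-- B replaces A's per-character quoted-name scan by a find-based jump between quote
-- positions that appends whole chunks (objective: simpler, same cost).


-- ===== PORT A =====
-- A's while loop over the chars after the opening quote: first = the name chars
-- collected, second = the remaining suffix s[i:] at the break ([] if it ran off the end).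
def pvLoopA : List Char → List Char × List Char
  | [] => ([], [])
  | c :: rest =>
    if c = '"' then
      match rest with
      | '"' :: rest2 =>
        let (n, r) := pvLoopA rest2
        ('"' :: n, r)
      | _ => ([], c :: rest)
    else
      let (n, r) := pvLoopA rest
      (c :: n, r)

def parse_single_field_py (field_str : String) : String × String :=
  let s := PySem.Str.strip field_str
  if PySem.Str.startswith s "\"" then
    let (nameChars, rest) := pvLoopA (s.toList.drop 1)
    (String.ofList nameChars, PySem.Str.strip (String.ofList (rest.drop 1)))
  else
    match PySem.Str.split₀Max s 1 with
    | [n, t] => (n, t)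
    | _ => ("", "")   -- raise ValueError: excluded by Pre_

-- ===== PORT B =====
-- B's find-jump loop: split the suffix at the first '"' (field_str.find('"', i)),
-- append the whole chunk before it, and either collapse a doubled quote and continue
-- or break.  first = the joined name chunks, second = the suffix s[i:] at the break.
def pvLoopB (l : List Char) : List Char × List Char :=
  let pre := l.takeWhile (· ≠ '"')
  let suf := l.dropWhile (· ≠ '"')
  if hs : suf = [] then (pre, [])     -- find returned -1: consume the rest, i = len
  else
    let t := suf.tail
    if hq : t.head? = some '"' then   -- j + 1 < n and field_str[j+1] == '"': doubled quote,
                                      -- keep chunk plus one quote and continue at i = j + 2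
      (pre ++ '"' :: (pvLoopB t.tail).1, (pvLoopB t.tail).2)
    else (pre, suf)                   -- closing quote: break with i = j
termination_by l.length
decreasing_by
  have h1 : (l.dropWhile (· ≠ '"')).length ≤ l.length := (List.dropWhile_sublist _).length_le
  have h2 : (l.dropWhile (· ≠ '"')) ≠ [] := hs
  have hq' : (l.dropWhile (· ≠ '"')).tail.head? = some '"' := hq
  have h3 : (l.dropWhile (· ≠ '"')).tail ≠ [] := by
    intro hh; rw [hh] at hq'; simp at hq'
  have h4 : 2 ≤ (l.dropWhile (· ≠ '"')).length := by
    rcases hl : l.dropWhile (· ≠ '"') with _ | ⟨a, b⟩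
    · exact absurd hl h2
    · rcases b with _ | ⟨c, d⟩
      · rw [hl] at h3; simp at h3
      · simp
  show (l.dropWhile (· ≠ '"')).tail.tail.length < l.length
  simp only [List.length_tail, decide_not] at h1 h4 ⊢
  omega

-- unquoted branch of B: `name, type_str = parts` after the len(parts) == 2 check
def pvUnquotedB (parts : List String) : String × String :=
  if parts.length = 2 then (parts.headD "", parts.tail.headD "")
  else ("", "")   -- raise ValueError: excluded by Pre_

def parse_single_field_py_alt (field_str : String) : String × String :=
  let s := PySem.Str.strip field_str
  if PySem.Str.startswith s "\"" then
    let nr := pvLoopB (s.toList.drop 1)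
    (String.ofList nr.1, PySem.Str.strip (String.ofList (nr.2.drop 1)))
  else
    pvUnquotedB (PySem.Str.split₀Max s 1)

-- ===== PRECONDITION & SPEC =====
-- A raises ValueError exactly when the stripped input is unquoted and split(None, 1)
-- yields fewer than two parts; Pre_ excludes precisely those inputs (B raises there too).
def Pre_parse_single_field_py (field_str : String) : Prop :=
  PySem.Str.startswith (PySem.Str.strip field_str) "\"" = true ∨
  (PySem.Str.split₀Max (PySem.Str.strip field_str) 1).length = 2
instance (field_str : String) : Decidable (Pre_parse_single_field_py field_str) := by
  unfold Pre_parse_single_field_py; infer_instance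
def pvWitness_parse_single_field_py : String := "a INT"

def Spec_parse_single_field_py (field_str : String) (out : String × String) : Prop := out = parse_single_field_py_alt field_str
instance (field_str : String) (out : String × String) : Decidable (Spec_parse_single_field_py field_str out) := by unfold Spec_parse_single_field_py; infer_instance

-- ===== CLAIM (what is proved, stated in full; the proofs are below) =====
def Claim_equal_parse_single_field_py : Prop := ∀ (field_str : String), Dom_parse_single_field_py field_str → Pre_parse_single_field_py field_str → Spec_parse_single_field_py field_str (parse_single_field_py field_str)

-- ===== LEMMAS AND PROOFS =====
theorem pvPred_eq : (fun x : Char => !decide (x = '"')) = (fun x => decide (x ≠ '"')) := by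
  funext x; simp

theorem pvLoopA_cons_ne (c : Char) (rest : List Char) (hc : ¬ c = '"') :
    pvLoopA (c :: rest) = (c :: (pvLoopA rest).1, (pvLoopA rest).2) := by
  rcases hsp : rest with _ | ⟨d, ts⟩
  · rw [pvLoopA.eq_3 c [] (by intro r2 hr2; cases hr2), if_neg hc]
  · by_cases hd : d = '"'
    · subst hd
      rw [pvLoopA.eq_2, if_neg hc]
    · rw [pvLoopA.eq_3 c (d :: ts) (by intro r2 hr2; injection hr2 with h1 _; exact hd h1),
        if_neg hc]

theorem pvLoopA_prefix (pre suf : List Char) (hp : ∀ c ∈ pre, ¬ c = '"') :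
    pvLoopA (pre ++ suf) = (pre ++ (pvLoopA suf).1, (pvLoopA suf).2) := by
  induction pre with
  | nil => simp
  | cons c p ih =>
    have hc : ¬ c = '"' := hp c (by simp)
    have h2 := ih (fun d hd => hp d (by simp [hd]))
    rw [List.cons_append, pvLoopA_cons_ne c (p ++ suf) hc, h2]
    simp

theorem pvLoopA_split (l : List Char) :
    pvLoopA l = (l.takeWhile (· ≠ '"') ++ (pvLoopA (l.dropWhile (· ≠ '"'))).1,
                 (pvLoopA (l.dropWhile (· ≠ '"'))).2) := by
  have key := pvLoopA_prefix (l.takeWhile (fun x => decide (x ≠ '"')))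
      (l.dropWhile (fun x => decide (x ≠ '"')))
      (by intro c hc; have := List.mem_takeWhile_imp hc; simpa using this)
  rw [List.takeWhile_append_dropWhile] at key
  exact key

theorem pvLoopA_eq_pvLoopB (l : List Char) : pvLoopA l = pvLoopB l := by
  fun_induction pvLoopB l with
  | case1 l pre suf hs =>
    have hs' : List.dropWhile (fun x => decide (x ≠ '"')) l = [] := hs
    rw [pvLoopA_split l, hs']
    simp [pvLoopA]
    rw [pvPred_eq]
  | case2 l pre suf hs t hq ih =>
    have hs' : List.dropWhile (fun x => decide (x ≠ '"')) l ≠ [] := hs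
    have hq' : (List.dropWhile (fun x => decide (x ≠ '"')) l).tail.head? = some '"' := hq
    have ih' : pvLoopA (List.dropWhile (fun x => decide (x ≠ '"')) l).tail.tail
        = pvLoopB (List.dropWhile (fun x => decide (x ≠ '"')) l).tail.tail := ih
    show pvLoopA l
        = (List.takeWhile (fun x => decide (x ≠ '"')) l
            ++ '"' :: (pvLoopB (List.dropWhile (fun x => decide (x ≠ '"')) l).tail.tail).1,
           (pvLoopB (List.dropWhile (fun x => decide (x ≠ '"')) l).tail.tail).2)
    rcases hd : List.dropWhile (fun x => decide (x ≠ '"')) l with _ | ⟨head, tl⟩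
    · exact absurd hd hs'
    have hh : head = '"' := by
      have hx := List.dropWhile_get_zero_not (p := fun x => decide (x ≠ '"')) l
        (by rw [hd]; simp)
      have hd2 := hd
      simp only [decide_not] at hd2
      simp [hd2] at hx
      exact hx
    subst hh
    rw [hd] at hq'
    simp only [List.tail_cons] at hq'
    rcases htl : tl with _ | ⟨e, t2⟩
    · rw [htl] at hq'; simp at hq'
    rw [htl] at hq'
    simp only [List.head?_cons, Option.some.injEq] at hq'
    subst hq'
    rw [hd, htl] at ih'
    simp only [List.tail_cons] at ih' ⊢
    rw [pvLoopA_split l, hd, htl]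
    rw [pvLoopA.eq_2, if_pos rfl]
    rw [ih']
  | case3 l pre suf hs t hq =>
    have hs' : List.dropWhile (fun x => decide (x ≠ '"')) l ≠ [] := hs
    have hq' : ¬ (List.dropWhile (fun x => decide (x ≠ '"')) l).tail.head? = some '"' := hq
    show pvLoopA l
        = (List.takeWhile (fun x => decide (x ≠ '"')) l,
           List.dropWhile (fun x => decide (x ≠ '"')) l)
    rcases hd : List.dropWhile (fun x => decide (x ≠ '"')) l with _ | ⟨head, tl⟩
    · exact absurd hd hs'
    have hh : head = '"' := by
      have hx := List.dropWhile_get_zero_not (p := fun x => decide (x ≠ '"')) l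
        (by rw [hd]; simp)
      have hd2 := hd
      simp only [decide_not] at hd2
      simp [hd2] at hx
      exact hx
    subst hh
    rw [hd] at hq'
    simp only [List.tail_cons] at hq'
    have ht : ∀ t2 : List Char, tl ≠ '"' :: t2 := by
      intro t2 ht2
      rw [ht2] at hq'
      simp at hq'
    rw [pvLoopA_split l, hd]
    rw [pvLoopA.eq_3 '"' tl (fun r2 hr2 => ht r2 hr2), if_pos rfl]
    simp

theorem pvUnquoted_eq (parts : List String) :
    (match parts with
      | [n, t] => (n, t)
      | _ => (("" : String), ("" : String))) = pvUnquotedB parts := by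
  match parts with
  | [] => simp [pvUnquotedB]
  | [a] => simp [pvUnquotedB]
  | [a, b] => simp [pvUnquotedB]
  | a :: b :: c :: r => simp [pvUnquotedB]

-- ===== VERDICT (by name: the statement is the Claim_ definition above) =====
theorem parse_single_field_py_spec : Claim_equal_parse_single_field_py := by
  intro s _ _
  unfold Spec_parse_single_field_py parse_single_field_py parse_single_field_py_alt
  simp only [pvLoopA_eq_pvLoopB]
  split
  · rfl
  · exact pvUnquoted_eq _
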